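-- pv_equiv track=rewrite | github.com/nefeliKa/Thesis-Project-Building-Retrofitting-Planning-Optimization | house.py | get_state_space
-- ===== SOURCE A (Python) =====
-- def get_state_space(num_damage_states: int):
--     state_space = {}
--     state_number = 0
--
--     for r_damage_state in range(num_damage_states):
--         for w_damage_state in range(num_damage_states):
--             for c_damage_state in range(num_damage_states):
--                 state_space[state_number] = (r_damage_state, w_damage_state, c_damage_state)
--                 state_number += 1
--     return state_space
-- ===== SOURCE B (Python) =====
-- def get_state_space(num_damage_states: int):
--     n = num_damage_states
--     return {i: (i // (n * n), (i // n) % n, i % n) for i in range(n ** 3)}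
-- ===== Notes on version B (the rewrite author's own statement) =====
-- stated objective: alternative
-- what changed: Replaced the triple nested loop with a running counter by a single flat pass over range(n**3) that reconstructs each coordinate in closed form via i//(n*n), (i//n)%n, i%n.
import Mathlib
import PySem

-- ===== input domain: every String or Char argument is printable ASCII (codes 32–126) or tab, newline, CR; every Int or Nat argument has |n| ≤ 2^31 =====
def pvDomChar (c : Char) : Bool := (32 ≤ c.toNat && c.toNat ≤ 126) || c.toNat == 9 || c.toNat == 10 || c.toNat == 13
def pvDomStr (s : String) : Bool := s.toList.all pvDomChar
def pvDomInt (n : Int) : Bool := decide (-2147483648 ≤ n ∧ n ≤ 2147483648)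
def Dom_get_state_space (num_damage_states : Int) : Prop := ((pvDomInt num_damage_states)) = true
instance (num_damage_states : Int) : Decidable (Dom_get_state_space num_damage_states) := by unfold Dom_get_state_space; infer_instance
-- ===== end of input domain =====

-- B replaces the triple nested enumeration-with-counter by one flat pass over range(n^3)
-- reconstructing each coordinate arithmetically (alternative decomposition, same cost).

-- ===== PORT A =====
def get_state_space (num_damage_states : Int) : List (Int × Int × Int × Int) :=
  (((PySem.List.pyRange 0 num_damage_states 1).foldl
    (fun s r_damage_state =>
      (PySem.List.pyRange 0 num_damage_states 1).foldl
        (fun s w_damage_state =>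
          (PySem.List.pyRange 0 num_damage_states 1).foldl
            (fun s c_damage_state =>
              (s.1.insert s.2 (r_damage_state, w_damage_state, c_damage_state), s.2 + 1))
            s)
        s)
    ((PySem.Dict.empty : PySem.Dict Int (Int × Int × Int)), (0 : Int))).1).items

-- ===== PORT B =====
def get_state_space_alt (num_damage_states : Int) : List (Int × Int × Int × Int) :=
  (PySem.List.pyRange 0 (num_damage_states ^ 3) 1).map
    (fun i => (i, PySem.Int.floordiv i (num_damage_states * num_damage_states),
                  PySem.Int.mod (PySem.Int.floordiv i num_damage_states) num_damage_states,
                  PySem.Int.mod i num_damage_states))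

-- ===== PRECONDITION & SPEC =====
def Spec_get_state_space (num_damage_states : Int) (out : List (Int × Int × Int × Int)) : Prop := out = get_state_space_alt num_damage_states
instance (num_damage_states : Int) (out : List (Int × Int × Int × Int)) : Decidable (Spec_get_state_space num_damage_states out) := by unfold Spec_get_state_space; infer_instance

-- ===== CLAIM (what is proved, stated in full; the proofs are below) =====
def Claim_equal_get_state_space : Prop := ∀ (num_damage_states : Int), Dom_get_state_space num_damage_states → Spec_get_state_space num_damage_states (get_state_space num_damage_states)

-- ===== LEMMAS AND PROOFS =====

-- A's triple loop body, flattened: the list of triples in A's visiting order.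
def pvTriples (n : Int) : List (Int × Int × Int) :=
  (PySem.List.pyRange 0 n 1).flatMap (fun r =>
    (PySem.List.pyRange 0 n 1).flatMap (fun w =>
      (PySem.List.pyRange 0 n 1).map (fun c => (r, w, c))))

-- A's insert-with-counter loop appends fresh keys, so it is enumerate.
theorem pv_fold_insert_enum :
    ∀ (L : List (Int × Int × Int)) (d : PySem.Dict Int (Int × Int × Int)) (k : Int),
      (∀ x ∈ d.keys, x < k) → d.keys.Nodup →
      L.foldl (fun s v => (s.1.insert s.2 v, s.2 + 1)) (d, k)
        = (PySem.Dict.mk (d.items ++ PySem.List.enumerate L k), k + L.length) := by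
  intro L
  induction L with
  | nil =>
    intro d k _ _
    simp [PySem.List.enumerate]
  | cons v L ih =>
    intro d k h hnd
    have hfresh : d.contains k = false := by
      rw [← Bool.not_eq_true, PySem.Dict.contains_iff_mem_keys]
      intro hm; exact absurd (h k hm) (lt_irrefl k)
    have h' : ∀ x ∈ (d.insert k v).keys, x < k + 1 := by
      intro x hx
      rcases (PySem.Dict.mem_keys_insert d k x v).mp hx with rfl | hx
      · omega
      · have := h x hx; omega
    have hnd' : (d.insert k v).keys.Nodup := PySem.Dict.nodup_keys_insert d k v hnd
    have := ih (d.insert k v) (k + 1) h' hnd'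
    simp only [List.foldl_cons, this, PySem.Dict.items_insert_of_not_contains d v hfresh,
      PySem.List.enumerate, List.length_cons]
    simp only [List.append_assoc, List.singleton_append, Prod.mk.injEq]
    refine ⟨trivial, ?_⟩
    push_cast; ring

theorem pv_portA_eq_enum (n : Int) :
    get_state_space n = PySem.List.enumerate (pvTriples n) 0 := by
  unfold get_state_space
  have h2 : ((PySem.List.pyRange 0 n 1).foldl
      (fun s r =>
        (PySem.List.pyRange 0 n 1).foldl
          (fun s w =>
            (PySem.List.pyRange 0 n 1).foldl
              (fun s c => (s.1.insert s.2 (r, w, c), s.2 + 1)) s) s)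
      ((PySem.Dict.empty : PySem.Dict Int (Int × Int × Int)), (0 : Int)))
      = (pvTriples n).foldl (fun s v => (s.1.insert s.2 v, s.2 + 1))
          ((PySem.Dict.empty : PySem.Dict Int (Int × Int × Int)), (0 : Int)) := by
    unfold pvTriples
    simp only [List.foldl_flatMap, List.foldl_map]
  rw [h2, pv_fold_insert_enum (pvTriples n) _ 0 (by simp) (by simp)]
  simp [PySem.Dict.empty]

-- cube index decomposition, over Nat
theorem pv_range_mul_flatMap {α : Type} (b : Nat) (g : Nat → Nat → α) :
    ∀ a, (List.range (a * b)).map (fun i => g (i / b) (i % b))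
       = (List.range a).flatMap (fun r => (List.range b).map (fun c => g r c)) := by
  intro a
  induction a with
  | zero => simp
  | succ a ih =>
    have hab : (a + 1) * b = a * b + b := by ring
    rw [hab, List.range_add, List.map_append, List.range_succ, List.flatMap_append, ih]
    congr 1
    · simp only [List.flatMap_cons, List.flatMap_nil, List.append_nil, List.map_map]
      apply List.map_congr_left
      intro x hx
      have hxb : x < b := List.mem_range.mp hx
      have hb : 0 < b := lt_of_le_of_lt (Nat.zero_le x) hxb
      have hdiv : (a * b + x) / b = a := by
        rw [Nat.add_comm, Nat.mul_comm, Nat.add_mul_div_left x a hb, Nat.div_eq_of_lt hxb,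
          Nat.zero_add]
      have hmod : (a * b + x) % b = x := by
        rw [Nat.add_comm, Nat.add_mul_mod_self_right, Nat.mod_eq_of_lt hxb]
      simp [Function.comp, hdiv, hmod]

theorem pv_cube_decomp {α : Type} (N : Nat) (g : Nat → Nat → Nat → α) :
    (List.range N).flatMap (fun r => (List.range N).flatMap (fun w =>
        (List.range N).map (fun c => g r w c)))
      = (List.range (N ^ 3)).map (fun i => g (i / (N * N)) (i / N % N) (i % N)) := by
  have h1 : ∀ r, (List.range N).flatMap (fun w => (List.range N).map (fun c => g r w c))
      = (List.range (N * N)).map (fun j => g r (j / N) (j % N)) :=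
    fun r => (pv_range_mul_flatMap N (fun w c => g r w c) N).symm
  simp only [h1]
  rw [← pv_range_mul_flatMap (N * N) (fun r j => g r (j / N) (j % N)) N]
  have hpow : N ^ 3 = N * (N * N) := by ring
  rw [hpow]
  apply List.map_congr_left
  intro i _
  have h2 : i % (N * N) / N = i / N % N := Nat.mod_mul_right_div_self i N N
  have h3 : i % (N * N) % N = i % N := Nat.mod_mod_of_dvd i (dvd_mul_right N N)
  rw [h2, h3]

theorem pv_enum_map_range' {α : Type} (f : Nat → α) :
    ∀ (M j : Nat), PySem.List.enumerate ((List.range' j M).map f) (j : Int)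
      = (List.range' j M).map (fun (k : Nat) => ((k : Int), f k)) := by
  intro M
  induction M with
  | zero => intro j; simp
  | succ M ih =>
    intro j
    rw [List.range'_succ]
    simp only [List.map_cons, PySem.List.enumerate]
    have := ih (j + 1)
    push_cast at this ⊢
    rw [this]

theorem pv_enum_map_range {α : Type} (M : Nat) (f : Nat → α) :
    PySem.List.enumerate ((List.range M).map f) 0
      = (List.range M).map (fun (k : Nat) => ((k : Int), f k)) := by
  have := pv_enum_map_range' f M 0
  simpa [List.range_eq_range'] using this

-- ===== VERDICT (by name: the statement is the Claim_ definition above) =====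
theorem get_state_space_spec : Claim_equal_get_state_space := by
  unfold Claim_equal_get_state_space Spec_get_state_space
  intro n _
  rw [pv_portA_eq_enum n]
  by_cases hn : n ≤ 0
  · have hT : pvTriples n = [] := by
      unfold pvTriples
      rw [PySem.List.pyRange_one_eq_nil hn]
      simp
    have hcube : n ^ 3 ≤ 0 := by nlinarith [sq_nonneg n]
    unfold get_state_space_alt
    rw [hT, PySem.List.pyRange_one_eq_nil hcube]
    simp
  · push Not at hn
    obtain ⟨N, rfl⟩ : ∃ N : Nat, n = (N : Int) := ⟨n.toNat, (Int.toNat_of_nonneg hn.le).symm⟩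
    have hT : pvTriples (N : Int)
        = (List.range (N ^ 3)).map (fun i =>
            (((i / (N * N) : Nat) : Int), ((i / N % N : Nat) : Int), ((i % N : Nat) : Int))) := by
      unfold pvTriples
      rw [PySem.List.pyRange_zero_natCast]
      simp only [List.flatMap_map, List.map_map]
      exact pv_cube_decomp N (fun r w c => (((r : Nat) : Int), ((w : Nat) : Int), ((c : Nat) : Int)))
    rw [hT, pv_enum_map_range]
    unfold get_state_space_alt
    have hp3 : ((N : Int)) ^ 3 = ((N ^ 3 : Nat) : Int) := by push_cast; ring
    have hmul : ((N : Int)) * (N : Int) = ((N * N : Nat) : Int) := by push_cast; ring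
    rw [hp3, PySem.List.pyRange_zero_natCast, List.map_map]
    apply List.map_congr_left
    intro k _
    simp only [Function.comp_apply, hmul, PySem.Int.floordiv_natCast, PySem.Int.mod_natCast]
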